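-- pv_equiv track=rewrite | github.com/nmpluta/Python | Exercises/lab_1/listCross2.py | listCross2
-- ===== SOURCE A (Python) =====
-- def listCross2(l1, l2):
--     output_list = []
--     for el_l1 in l1:
--         for el_l2 in l2:
--             if el_l1[:2] == el_l2[:2]:                      # [:2] two first letters - match
--                 output_list.append(el_l2)                   # appending words with a match to output list
--                 output_list.append(el_l1)
--     output_list = list(dict.fromkeys(output_list))          # deleting duplicates from output_list
--     output_list.sort()
--     output_list.reverse()
--     return output_list
-- ===== SOURCE B (Python) =====
-- def listCross2(l1, l2):
--     common = {x[:2] for x in l1} & {x[:2] for x in l2}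
--     return sorted({x for x in l1 + l2 if x[:2] in common}, reverse=True)
-- ===== Notes on version B (the rewrite author's own statement) =====
-- stated objective: faster
-- what changed: Replaces A's nested pairwise scan with double-append by a prefix-set intersection followed by one flat filtering pass over l1 + l2, deduplicated as a set and sorted descending in one call.
import Mathlib
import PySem

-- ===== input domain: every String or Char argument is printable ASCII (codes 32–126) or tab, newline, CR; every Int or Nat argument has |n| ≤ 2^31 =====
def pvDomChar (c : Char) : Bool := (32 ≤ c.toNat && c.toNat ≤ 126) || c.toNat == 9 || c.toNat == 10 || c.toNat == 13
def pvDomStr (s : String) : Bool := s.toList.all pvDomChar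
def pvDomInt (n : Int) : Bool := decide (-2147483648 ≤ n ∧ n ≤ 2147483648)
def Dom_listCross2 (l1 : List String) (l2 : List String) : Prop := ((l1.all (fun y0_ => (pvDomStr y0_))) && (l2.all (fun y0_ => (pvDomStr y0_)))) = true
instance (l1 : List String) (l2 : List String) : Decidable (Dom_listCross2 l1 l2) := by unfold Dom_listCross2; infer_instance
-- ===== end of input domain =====

-- B replaces A's quadratic nested pairwise scan by a prefix-set intersection and one flat
-- filtering pass over l1 ++ l2 (objective: faster, O(n*m) → O(n+m+k log k) modulo the sort).

-- ===== PORT A =====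
def listCross2 (l1 : List String) (l2 : List String) : List String :=
  -- nested for-loops appending el_l2 then el_l1 on a 2-char-prefix match
  let output_list : List String :=
    l1.foldl (fun acc el_l1 =>
      l2.foldl (fun acc el_l2 =>
        if PySem.Str.slice el_l1 none (some 2) = PySem.Str.slice el_l2 none (some 2) then
          (acc ++ [el_l2]) ++ [el_l1]
        else acc) acc) []
  let output_list := PySem.List.dedup output_list        -- list(dict.fromkeys(...))
  let output_list := PySem.List.sorted output_list (fun x => x) false   -- .sort()
  output_list.reverse                                    -- .reverse()

-- ===== PORT B =====
def pvPref2 (s : String) : String := PySem.Str.slice s none (some 2)   -- x[:2]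

def listCross2_alt (l1 : List String) (l2 : List String) : List String :=
  let common : PySem.Set String :=
    PySem.Set.inter (PySem.Set.ofList (l1.map pvPref2)) (PySem.Set.ofList (l2.map pvPref2))
  PySem.List.sorted
    (PySem.Set.ofList ((l1 ++ l2).filter (fun x => PySem.Set.contains common (pvPref2 x))))
    (fun x => x) true

-- ===== PRECONDITION & SPEC =====
def Spec_listCross2 (l1 : List String) (l2 : List String) (out : List String) : Prop := out = listCross2_alt l1 l2
instance (l1 : List String) (l2 : List String) (out : List String) : Decidable (Spec_listCross2 l1 l2 out) := by unfold Spec_listCross2; infer_instance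

-- ===== CLAIM (what is proved, stated in full; the proofs are below) =====
def Claim_equal_listCross2 : Prop := ∀ (l1 : List String) (l2 : List String), Dom_listCross2 l1 l2 → Spec_listCross2 l1 l2 (listCross2 l1 l2)

-- ===== LEMMAS AND PROOFS =====

-- membership in A's inner loop over l2
lemma mem_inner (l2 : List String) (a : String) (acc : List String) (x : String) :
    x ∈ l2.foldl (fun acc el_l2 =>
        if PySem.Str.slice a none (some 2) = PySem.Str.slice el_l2 none (some 2) then
          (acc ++ [el_l2]) ++ [a]
        else acc) acc
      ↔ x ∈ acc ∨ ∃ b ∈ l2, pvPref2 a = pvPref2 b ∧ (x = b ∨ x = a) := by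
  induction l2 generalizing acc with
  | nil => simp
  | cons c t ih =>
    simp only [List.foldl_cons, ih, pvPref2]
    split_ifs with h
    · simp only [List.mem_append, List.mem_cons,
        List.not_mem_nil, or_false]
      constructor
      · rintro (((hx | hx) | hx) | ⟨b, hb, hp, hx⟩)
        · exact Or.inl hx
        · exact Or.inr ⟨c, Or.inl rfl, h, Or.inl hx⟩
        · exact Or.inr ⟨c, Or.inl rfl, h, Or.inr hx⟩
        · exact Or.inr ⟨b, Or.inr hb, hp, hx⟩
      · rintro (hx | ⟨b, hb', hp, hx⟩)
        · exact Or.inl (Or.inl (Or.inl hx))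
        · rcases hb' with rfl | hb'
          · rcases hx with rfl | rfl
            · exact Or.inl (Or.inl (Or.inr rfl))
            · exact Or.inl (Or.inr rfl)
          · rcases hx with rfl | rfl
            · exact Or.inr ⟨x, hb', hp, Or.inl rfl⟩
            · exact Or.inr ⟨b, hb', hp, Or.inr rfl⟩
    · simp only [List.mem_cons]
      constructor
      · rintro (hx | ⟨b, hb, hp, hx⟩)
        · exact Or.inl hx
        · exact Or.inr ⟨b, Or.inr hb, hp, hx⟩
      · rintro (hx | ⟨b, hb', hp, hx⟩)
        · exact Or.inl hx
        · rcases hb' with rfl | hb'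
          · exact absurd hp h
          · exact Or.inr ⟨b, hb', hp, hx⟩

-- membership in A's whole nested loop
lemma mem_outer (l1 l2 : List String) (x : String) :
    x ∈ l1.foldl (fun acc el_l1 =>
        l2.foldl (fun acc el_l2 =>
          if PySem.Str.slice el_l1 none (some 2) = PySem.Str.slice el_l2 none (some 2) then
            (acc ++ [el_l2]) ++ [el_l1]
          else acc) acc) []
      ↔ ∃ a ∈ l1, ∃ b ∈ l2, pvPref2 a = pvPref2 b ∧ (x = b ∨ x = a) := by
  suffices h : ∀ acc : List String, x ∈ l1.foldl (fun acc el_l1 =>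
        l2.foldl (fun acc el_l2 =>
          if PySem.Str.slice el_l1 none (some 2) = PySem.Str.slice el_l2 none (some 2) then
            (acc ++ [el_l2]) ++ [el_l1]
          else acc) acc) acc
      ↔ x ∈ acc ∨ ∃ a ∈ l1, ∃ b ∈ l2, pvPref2 a = pvPref2 b ∧ (x = b ∨ x = a) by
    simpa using h []
  induction l1 with
  | nil => intro acc; simp
  | cons a t ih =>
    intro acc
    simp only [List.foldl_cons, ih, mem_inner]
    constructor
    · rintro ((hx | ⟨b, hb, hp, hx⟩) | ⟨a', ha', b, hb, hp, hx⟩)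
      · exact Or.inl hx
      · exact Or.inr ⟨a, List.mem_cons_self .., b, hb, hp, hx⟩
      · exact Or.inr ⟨a', List.mem_cons_of_mem _ ha', b, hb, hp, hx⟩
    · rintro (hx | ⟨a', ha', b, hb, hp, hx⟩)
      · exact Or.inl (Or.inl hx)
      · rcases List.mem_cons.mp ha' with rfl | ha'
        · exact Or.inl (Or.inr ⟨b, hb, hp, hx⟩)
        · exact Or.inr ⟨a', ha', b, hb, hp, hx⟩

-- the two deduplicated carriers have the same members
lemma carriers_mem (l1 l2 : List String) (x : String) :
    (∃ a ∈ l1, ∃ b ∈ l2, pvPref2 a = pvPref2 b ∧ (x = b ∨ x = a))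
      ↔ ((x ∈ l1 ∨ x ∈ l2) ∧
         (∃ a ∈ l1, pvPref2 a = pvPref2 x) ∧ (∃ b ∈ l2, pvPref2 b = pvPref2 x)) := by
  constructor
  · rintro ⟨a, ha, b, hb, hp, hx⟩
    rcases hx with rfl | rfl
    · exact ⟨Or.inr hb, ⟨a, ha, hp⟩, ⟨x, hb, rfl⟩⟩
    · exact ⟨Or.inl ha, ⟨x, ha, rfl⟩, ⟨b, hb, hp.symm⟩⟩
  · rintro ⟨hx, ⟨a, ha, hpa⟩, ⟨b, hb, hpb⟩⟩
    rcases hx with hx | hx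
    · exact ⟨x, hx, b, hb, hpb.symm, Or.inr rfl⟩
    · exact ⟨a, ha, x, hx, hpa, Or.inl rfl⟩

-- ===== VERDICT (by name: the statement is the Claim_ definition above) =====
theorem listCross2_spec : Claim_equal_listCross2 := by
  intro l1 l2 _
  unfold Spec_listCross2 listCross2 listCross2_alt
  set M := l1.foldl (fun acc el_l1 =>
      l2.foldl (fun acc el_l2 =>
        if PySem.Str.slice el_l1 none (some 2) = PySem.Str.slice el_l2 none (some 2) then
          (acc ++ [el_l2]) ++ [el_l1]
        else acc) acc) [] with hM
  set F := (l1 ++ l2).filter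
      (fun x => PySem.Set.contains
        (PySem.Set.inter (PySem.Set.ofList (l1.map pvPref2)) (PySem.Set.ofList (l2.map pvPref2)))
        (pvPref2 x)) with hF
  -- both carriers are Nodup and have the same membership
  have hmem : ∀ x, x ∈ PySem.List.dedup M ↔ x ∈ PySem.Set.ofList F := by
    intro x
    rw [PySem.List.mem_dedup, PySem.Set.mem_ofList, hM, mem_outer, carriers_mem, hF,
        List.mem_filter]
    simp only [PySem.Set.contains_iff, PySem.Set.mem_inter, PySem.Set.mem_ofList,
      List.mem_append, List.mem_map]
  have hperm : (PySem.List.sorted (PySem.List.dedup M) (fun x => x) false).reverse.Perm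
      (PySem.Set.ofList F) := by
    refine (List.perm_ext_iff_of_nodup ?_ (PySem.Set.nodup_ofList F)).mpr ?_
    · exact (List.nodup_reverse).mpr
        ((PySem.List.sorted_perm _ _ _).nodup_iff.mpr (PySem.List.nodup_dedup M))
    · intro x
      rw [List.mem_reverse, PySem.List.mem_sorted]
      exact hmem x
  have hgt : (PySem.List.sorted (PySem.List.dedup M) (fun x => x) false).reverse.Pairwise
      (fun a b => (fun x => x) b < (fun x => x) a) := by
    rw [List.pairwise_reverse]
    have hle := PySem.List.sorted_pairwise (xs := PySem.List.dedup M) (key := fun x => x)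
    have hnd : (PySem.List.sorted (PySem.List.dedup M) (fun x => x) false).Nodup :=
      (PySem.List.sorted_perm _ _ _).nodup_iff.mpr (PySem.List.nodup_dedup M)
    exact (hle.and hnd).imp (fun h => lt_of_le_of_ne h.1 h.2)
  exact (PySem.List.sorted_rev_eq_of_perm_of_pairwise_gt _ _ (fun x => x) hperm hgt).symm
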